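-- pv_equiv track=rewrite | github.com/sergiogibe/2DBeamsLatticeGen | BeamsPackage/Mesh/tesselation.py | group_indices_by_tag
-- ===== SOURCE A (Python) =====
-- from collections import OrderedDict
-- from typing import Iterable
--
-- def group_indices_by_tag(indices: Iterable[int], tags:    Iterable[int]):
--     """
--     Returns:
--       groups      -> [[indices with tag1], [indices with tag2], ...]
--       group_tags  -> [tag1, tag2, ...] in order of first appearance
--       groups_dict -> {tag: [indices], ...}
--
--     """
--     idx_iter = list(indices)
--     tag_iter = list(tags)
--     if len(idx_iter) != len(tag_iter):
--         raise ValueError("indices and tags must have the same length")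
--
--     groups = OrderedDict()
--     for i, t in zip(idx_iter, tag_iter):
--         groups.setdefault(t, []).append(i)
--
--     group_tags = list(groups.keys())
--     grouped_indices = list(groups.values())
--     return grouped_indices, group_tags, dict(groups)
-- ===== SOURCE B (Python) =====
-- def group_indices_by_tag(indices, tags):
--     idx_iter = list(indices)
--     tag_iter = list(tags)
--     if len(idx_iter) != len(tag_iter):
--         raise ValueError("indices and tags must have the same length")
--
--     # pass 1: assign each distinct tag a slot number in first-appearance order
--     first = {}
--     group_tags = []
--     for t in tag_iter:
--         if t not in first:
--             first[t] = len(group_tags)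
--             group_tags.append(t)
--
--     # pass 2: drop every index into its tag's slot
--     grouped_indices = [[] for _ in group_tags]
--     for i, t in zip(idx_iter, tag_iter):
--         grouped_indices[first[t]].append(i)
--
--     groups_dict = dict(zip(group_tags, grouped_indices))
--     return grouped_indices, group_tags, groups_dict
-- ===== Notes on version B (the rewrite author's own statement) =====
-- stated objective: alternative
-- what changed: Replaces the single accumulating OrderedDict.setdefault pass with two staged passes: first assign each distinct tag a numeric slot in first-appearance order, then fill a positional list of slots with the indices; no dict of lists is maintained.
import Mathlib
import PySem

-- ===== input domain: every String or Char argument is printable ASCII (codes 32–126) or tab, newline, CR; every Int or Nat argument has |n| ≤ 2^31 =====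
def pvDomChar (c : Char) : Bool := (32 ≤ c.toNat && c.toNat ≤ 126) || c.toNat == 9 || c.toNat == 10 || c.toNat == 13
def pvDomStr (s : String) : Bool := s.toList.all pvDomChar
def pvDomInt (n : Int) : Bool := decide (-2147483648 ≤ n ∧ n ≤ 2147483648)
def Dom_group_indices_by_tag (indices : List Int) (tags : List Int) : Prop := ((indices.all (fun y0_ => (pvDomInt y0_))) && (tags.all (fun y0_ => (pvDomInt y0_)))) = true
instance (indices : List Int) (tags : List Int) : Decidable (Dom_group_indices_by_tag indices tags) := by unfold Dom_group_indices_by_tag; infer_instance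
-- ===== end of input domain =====

-- B groups in two staged passes (tag -> slot number map, then fill positional slots) instead of
-- A's single dict-of-lists pass; objective: alternative decomposition. A raises ValueError on
-- unequal lengths; Pre_ excludes that.

-- ===== PORT A =====
-- single pass: groups.setdefault(t, []).append(i) over zip(idx_iter, tag_iter)
def group_indices_by_tag (indices : List Int) (tags : List Int) : List (List Int) × List Int × (List (Int × List Int)) :=
  if indices.length ≠ tags.length then ([], [], [])   -- ValueError in Python; excluded by Pre_
  else
    let groups : PySem.Dict Int (List Int) :=
      (indices.zip tags).foldl (fun d p => d.modify p.2 [] (· ++ [p.1])) PySem.Dict.empty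
    (groups.values, groups.keys, groups.items)

-- ===== PORT B =====
-- pass 1: first = {} ; group_tags = [] ; each new tag gets the next slot number
-- (slot numbers are list positions len(group_tags), hence Nat)
def pvPass1 (tags : List Int) : PySem.Dict Int Nat × List Int :=
  tags.foldl (fun st t =>
    if st.1.contains t then st
    else (st.1.insert t st.2.length, st.2 ++ [t])) (PySem.Dict.empty, [])

-- pass 2: grouped_indices[first[t]].append(i)  (t is always a key of first, so getD's default is never used)
def pvPass2 (pairs : List (Int × Int)) (first : PySem.Dict Int Nat) (slots : List (List Int)) : List (List Int) :=
  pairs.foldl (fun sl p =>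
    sl.set (first.getD p.2 0) (sl.getD (first.getD p.2 0) [] ++ [p.1])) slots

def group_indices_by_tag_alt (indices : List Int) (tags : List Int) : List (List Int) × List Int × (List (Int × List Int)) :=
  if indices.length ≠ tags.length then ([], [], [])   -- ValueError in Python; excluded by Pre_
  else
    let fg := pvPass1 tags
    let grouped := pvPass2 (indices.zip tags) fg.1 (List.replicate fg.2.length [])
    (grouped, fg.2, fg.2.zip grouped)   -- dict(zip(group_tags, grouped_indices))

-- ===== PRECONDITION & SPEC =====
-- Pre_ excludes exactly the inputs where A raises ValueError (unequal lengths).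
def Pre_group_indices_by_tag (indices : List Int) (tags : List Int) : Prop :=
  indices.length = tags.length
instance (indices : List Int) (tags : List Int) : Decidable (Pre_group_indices_by_tag indices tags) := by unfold Pre_group_indices_by_tag; infer_instance

def pvWitness_group_indices_by_tag : List Int × List Int := ([1, 2, 3, 4], [10, 20, 10, 20])

def Spec_group_indices_by_tag (indices : List Int) (tags : List Int) (out : List (List Int) × List Int × (List (Int × List Int))) : Prop := out = group_indices_by_tag_alt indices tags
instance (indices : List Int) (tags : List Int) (out : List (List Int) × List Int × (List (Int × List Int))) : Decidable (Spec_group_indices_by_tag indices tags out) := by unfold Spec_group_indices_by_tag; infer_instance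

-- ===== CLAIM (what is proved, stated in full; the proofs are below) =====
def Claim_equal_group_indices_by_tag : Prop := ∀ (indices : List Int) (tags : List Int), Dom_group_indices_by_tag indices tags → Pre_group_indices_by_tag indices tags → Spec_group_indices_by_tag indices tags (group_indices_by_tag indices tags)

-- ===== LEMMAS AND PROOFS =====

-- A's loop dict, named for the proofs
def pvGroups (indices : List Int) (tags : List Int) : PySem.Dict Int (List Int) :=
  (indices.zip tags).foldl (fun d p => d.modify p.2 [] (· ++ [p.1])) PySem.Dict.empty

lemma pvGroups_keys (indices tags : List Int) (h : indices.length = tags.length) :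
    (pvGroups indices tags).keys = PySem.List.dedup tags := by
  unfold pvGroups
  rw [PySem.Dict.keys_foldl_modify_key (key := fun p : Int × Int => p.2)]
  have hm : List.map (fun p : Int × Int => p.2) (indices.zip tags) = tags := by
    simpa using List.map_snd_zip h.ge
  simp [PySem.Set.update, PySem.Set.ofList_eq_foldl, PySem.Dict.keys_empty, hm]

lemma pvGroups_nodup (indices tags : List Int) : (pvGroups indices tags).keys.Nodup := by
  unfold pvGroups
  exact PySem.Dict.nodup_keys_foldl_modify_key _ (fun p : Int × Int => p.2) _ _ _
    (by simp [PySem.Dict.keys_empty])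

lemma pvSwapFilterMap (l : List (Int × Int)) (t : Int) :
    (l.filter (fun p => p.1 == t)).map (·.2) =
      ((l.map Prod.swap).filter (fun p => p.2 == t)).map (·.1) := by
  induction l with
  | nil => rfl
  | cons a l ih =>
    cases a with
    | mk x y => by_cases hx : x = t <;> simp [hx, ih]

lemma pvGroups_getD (indices tags : List Int) (t : Int) :
    (pvGroups indices tags).getD t [] =
      ((indices.zip tags).filter (fun p => p.2 == t)).map (·.1) := by
  unfold pvGroups
  have hswap : indices.zip tags = (tags.zip indices).map Prod.swap := by
    rw [List.zip_swap]
  rw [hswap, List.foldl_map]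
  have h2 := PySem.Dict.getD_foldl_modify_append (l := tags.zip indices)
    (d := (PySem.Dict.empty : PySem.Dict Int (List Int))) (c := t)
  simp only [Prod.swap] at h2 ⊢
  rw [h2]
  simpa using pvSwapFilterMap (tags.zip indices) t

lemma pvZipSelfMap (l : List Int) (f : Int → List Int) :
    l.zip (l.map f) = l.map (fun x => (x, f x)) := by
  induction l with
  | nil => rfl
  | cons a l ih => simp [ih]

-- pass-1 loop invariant: the dict maps each tag of g to its position, g collects first appearances
lemma pvPass1_inv : ∀ (ts : List Int) (d : PySem.Dict Int Nat) (g : List Int),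
    (∀ x, d.contains x = decide (x ∈ g)) →
    (∀ x ∈ g, d.getD x 0 = g.idxOf x) →
    (ts.foldl (fun st t =>
        if st.1.contains t then st
        else (st.1.insert t st.2.length, st.2 ++ [t])) (d, g)).2 = ts.foldl PySem.Set.add g ∧
    (∀ x, (ts.foldl (fun st t =>
        if st.1.contains t then st
        else (st.1.insert t st.2.length, st.2 ++ [t])) (d, g)).1.getD x 0 =
      ((ts.foldl PySem.Set.add g).idxOf x : Nat) ∨ x ∉ ts.foldl PySem.Set.add g) := by
  intro ts
  induction ts with
  | nil =>
    intro d g hc hg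
    refine ⟨rfl, fun x => ?_⟩
    by_cases hx : x ∈ g
    · exact Or.inl (hg x hx)
    · exact Or.inr hx
  | cons t ts ih =>
    intro d g hc hg
    simp only [List.foldl_cons]
    by_cases hm : t ∈ g
    · have h1 : d.contains t = true := by rw [hc t]; simp [hm]
      have h2 : PySem.Set.add g t = g := by simp [PySem.Set.add, PySem.Set.contains, hm]
      rw [h2]
      simpa [h1] using ih d g hc hg
    · have h1 : d.contains t = false := by rw [hc t]; simp [hm]
      have h2 : PySem.Set.add g t = g ++ [t] := by simp [PySem.Set.add, PySem.Set.contains, hm]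
      rw [h2]
      simp only [h1, Bool.false_eq_true, if_false]
      apply ih
      · intro x
        rw [PySem.Dict.contains_insert, hc x]
        by_cases hx : x = t <;> simp [hx, hm]
      · intro x hx
        rcases List.mem_append.mp hx with hxg | hxt
        · have hxt : x ≠ t := fun h => hm (h ▸ hxg)
          rw [PySem.Dict.getD_insert, if_neg hxt, hg x hxg,
            List.idxOf_append_of_mem hxg]
        · have hx' : x = t := by simpa using hxt
          subst hx'
          rw [PySem.Dict.getD_insert_self, List.idxOf_append_of_notMem hm]
          simp

lemma pvPass1_snd (tags : List Int) : (pvPass1 tags).2 = PySem.List.dedup tags := by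
  have h := (pvPass1_inv tags PySem.Dict.empty []
    (fun x => by simp [PySem.Dict.contains_empty]) (fun x hx => by simp at hx)).1
  rw [PySem.List.dedup_eq_ofList, PySem.Set.ofList_eq_foldl]
  exact h

lemma pvPass1_getD (tags : List Int) (x : Int) (hx : x ∈ (pvPass1 tags).2) :
    (pvPass1 tags).1.getD x 0 = ((pvPass1 tags).2.idxOf x : Nat) := by
  have h := (pvPass1_inv tags PySem.Dict.empty []
    (fun x => by simp [PySem.Dict.contains_empty]) (fun x hx => by simp at hx)).2 x
  have hsnd := (pvPass1_inv tags PySem.Dict.empty []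
    (fun x => by simp [PySem.Dict.contains_empty]) (fun x hx => by simp at hx)).1
  rcases h with h | h
  · rw [show (pvPass1 tags).2 = tags.foldl PySem.Set.add [] from hsnd]
    exact h
  · exact absurd (hsnd ▸ hx) h

lemma pvPass2_length : ∀ (pairs : List (Int × Int)) (d : PySem.Dict Int Nat)
    (slots : List (List Int)), (pvPass2 pairs d slots).length = slots.length := by
  intro pairs
  induction pairs with
  | nil => intro d slots; rfl
  | cons p rest ih =>
    intro d slots
    simp only [pvPass2, List.foldl_cons] at *
    rw [ih d _, List.length_set]

lemma pvPass2_getD : ∀ (pairs : List (Int × Int)) (g : List Int) (d : PySem.Dict Int Nat),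
    g.Nodup → (∀ x ∈ g, d.getD x 0 = (g.idxOf x : Nat)) → (∀ p ∈ pairs, p.2 ∈ g) →
    ∀ (slots : List (List Int)), slots.length = g.length → ∀ j, j < g.length →
    (pvPass2 pairs d slots).getD j [] =
      slots.getD j [] ++ (pairs.filter (fun p => p.2 == g.getD j 0)).map (·.1) := by
  intro pairs
  induction pairs with
  | nil =>
    intro g d _ _ _ slots _ j _
    simp [pvPass2]
  | cons p rest ih =>
    intro g d hnd hget hmem slots hlen j hj
    obtain ⟨i, t⟩ := p
    have ht : t ∈ g := hmem (i, t) List.mem_cons_self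
    have hk : d.getD t 0 = (g.idxOf t : Nat) := hget t ht
    have hkl : g.idxOf t < g.length := List.idxOf_lt_length_of_mem ht
    have hgj : g.getD j 0 = g[j] := by
      simp [List.getD_eq_getElem?_getD, List.getElem?_eq_getElem hj]
    simp only [pvPass2, List.foldl_cons]
    have hstep := ih g d hnd hget (fun q hq => hmem q (List.mem_cons_of_mem _ hq))
      (slots.set (d.getD t 0) (slots.getD (d.getD t 0) [] ++ [i]))
      (by rw [List.length_set]; exact hlen) j hj
    simp only [pvPass2] at hstep
    rw [hstep]
    by_cases hjt : g.getD j 0 = t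
    · have hjeq : g.idxOf t = j := by
        rw [← hjt, hgj]; exact List.Nodup.idxOf_getElem hnd j hj
      rw [hk, hjeq]
      have hjs : j < slots.length := by rw [hlen]; exact hj
      rw [show (slots.set j (slots.getD j [] ++ [i])).getD j [] = slots.getD j [] ++ [i] by
        simp [List.getD_eq_getElem?_getD, hjs]]
      rw [hjt]
      simp [List.append_assoc]
    · have hne : g.idxOf t ≠ j := by
        intro h
        apply hjt
        have hidx : g[g.idxOf t]? = some t := List.getElem?_idxOf ht
        rw [h, List.getElem?_eq_getElem hj] at hidx
        rw [hgj]
        exact Option.some_injective _ hidx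
      rw [hk]
      rw [show (slots.set (g.idxOf t) (slots.getD (g.idxOf t) [] ++ [i])).getD j [] =
          slots.getD j [] by simp [List.getD_eq_getElem?_getD, List.getElem?_set_ne hne]]
      have hff : (t == g.getD j 0) = false := by
        simp only [beq_eq_false_iff_ne, ne_eq]
        exact fun h => hjt h.symm
      simp only [List.filter_cons, hff, Bool.false_eq_true, if_false]

lemma pvGrouped_eq (indices tags : List Int) :
    pvPass2 (indices.zip tags) (pvPass1 tags).1 (List.replicate (pvPass1 tags).2.length []) =
      (PySem.List.dedup tags).map
        (fun t => ((indices.zip tags).filter (fun p => p.2 == t)).map (·.1)) := by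
  have hsnd := pvPass1_snd tags
  apply List.ext_getElem
  · rw [pvPass2_length, List.length_replicate, List.length_map, hsnd]
  · intro j hj1 hj2
    have hjlt : j < (PySem.List.dedup tags).length := by
      simpa using hj2
    have h := pvPass2_getD (indices.zip tags) (PySem.List.dedup tags) (pvPass1 tags).1
      (PySem.List.nodup_dedup tags)
      (fun x hx => by rw [← hsnd] at hx ⊢; exact pvPass1_getD tags x hx)
      (fun p hp => (PySem.List.mem_dedup tags p.2).mpr (List.of_mem_zip hp).2)
      (List.replicate (pvPass1 tags).2.length []) (by rw [List.length_replicate, hsnd]) j hjlt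
    have hres : (pvPass2 (indices.zip tags) (pvPass1 tags).1
        (List.replicate (pvPass1 tags).2.length [])).getD j [] =
        (pvPass2 (indices.zip tags) (pvPass1 tags).1
          (List.replicate (pvPass1 tags).2.length []))[j]'hj1 := by
      simp [List.getD_eq_getElem?_getD, List.getElem?_eq_getElem hj1]
    have hgj : (PySem.List.dedup tags).getD j 0 = (PySem.List.dedup tags)[j]'hjlt :=
      List.getD_eq_getElem _ 0 hjlt
    rw [← hres, h, hgj]
    simp

theorem group_indices_by_tag_spec : Claim_equal_group_indices_by_tag := by
  intro indices tags _ hpre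
  unfold Spec_group_indices_by_tag group_indices_by_tag group_indices_by_tag_alt
  have hlen : indices.length = tags.length := hpre
  rw [if_neg (by simp [hlen]), if_neg (by simp [hlen])]
  have hk := pvGroups_keys indices tags hlen
  have hnd := pvGroups_nodup indices tags
  have hval := PySem.Dict.values_eq_map_keys (pvGroups indices tags) hnd ([] : List Int)
  have hit := PySem.Dict.items_eq_map_keys (pvGroups indices tags) hnd ([] : List Int)
  show ((pvGroups indices tags).values, (pvGroups indices tags).keys, (pvGroups indices tags).items) =
    (pvPass2 (indices.zip tags) (pvPass1 tags).1 (List.replicate (pvPass1 tags).2.length []),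
     (pvPass1 tags).2,
     (pvPass1 tags).2.zip (pvPass2 (indices.zip tags) (pvPass1 tags).1
       (List.replicate (pvPass1 tags).2.length [])))
  rw [hval, hit, hk, pvGrouped_eq, pvPass1_snd]
  simp only [pvGroups_getD]
  simp [pvZipSelfMap]
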